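-- pv_equiv track=rewrite | github.com/Silicon7921/FFT-image-drawing | tosvg.py | length_within_points
-- ===== SOURCE A (Python) =====
-- from typing import Iterable, List, Union
--
-- def length_within_points(a : Iterable, empty_value : Union[int, float] = 0) -> int:
--     a = list(a)
--     l_pivot, r_pivot = -1, -2
--     for index, (l_val, r_val) in enumerate(zip(a[::1], a[::-1])):
--         if l_val != empty_value and l_pivot == -1:
--             l_pivot = index
--         if r_val != empty_value and r_pivot == -2:
--             r_pivot = len(a) - index
--     return r_pivot - l_pivot + 1
-- ===== SOURCE B (Python) =====
-- def length_within_points(a, empty_value=0):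
--     nonempty = [i for i, v in enumerate(list(a)) if v != empty_value]
--     if not nonempty:
--         return 0
--     return nonempty[-1] - nonempty[0] + 2
-- ===== Notes on version B (the rewrite author's own statement) =====
-- stated objective: simpler
-- what changed: Replaces the simultaneous forward-and-reversed sentinel scan (two pivot variables with -1/-2 sentinels over zip(a, a[::-1])) by one comprehension collecting the non-empty indices and reading off its endpoints; the speedup is a constant factor from dropping the reversed copy, zip and per-element sentinel branches.
import Mathlib
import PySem

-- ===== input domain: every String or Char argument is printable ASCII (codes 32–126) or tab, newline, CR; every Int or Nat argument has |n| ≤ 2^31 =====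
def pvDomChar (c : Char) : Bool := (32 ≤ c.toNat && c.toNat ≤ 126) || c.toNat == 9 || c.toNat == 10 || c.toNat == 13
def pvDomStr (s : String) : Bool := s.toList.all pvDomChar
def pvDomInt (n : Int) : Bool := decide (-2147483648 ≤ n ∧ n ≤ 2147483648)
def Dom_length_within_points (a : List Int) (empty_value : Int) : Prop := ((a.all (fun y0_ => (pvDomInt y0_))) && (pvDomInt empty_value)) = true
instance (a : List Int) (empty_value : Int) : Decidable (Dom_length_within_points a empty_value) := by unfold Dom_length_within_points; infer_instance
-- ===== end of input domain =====

-- ===== PORT A =====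
-- header: B replaces A's simultaneous forward-and-reversed sentinel scan by collecting
-- the non-empty indices once and reading off the endpoints (objective: simpler).
def length_within_points (a : List Int) (empty_value : Int) : Int :=
  let st := (PySem.List.enumerate (a.zip a.reverse) 0).foldl
    (fun (st : Int × Int) p =>
      let l := if p.2.1 ≠ empty_value ∧ st.1 = -1 then p.1 else st.1
      let r := if p.2.2 ≠ empty_value ∧ st.2 = -2 then (a.length : Int) - p.1 else st.2
      (l, r)) (-1, -2)
  st.2 - st.1 + 1

-- ===== PORT B =====
def length_within_points_alt (a : List Int) (empty_value : Int) : Int :=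
  let nonempty := ((PySem.List.enumerate a 0).filter (fun p => p.2 ≠ empty_value)).map Prod.fst
  match nonempty with
  | [] => 0
  | x :: rest => (x :: rest).getLast (by simp) - x + 2

-- ===== PRECONDITION & SPEC =====
def Spec_length_within_points (a : List Int) (empty_value : Int) (out : Int) : Prop := out = length_within_points_alt a empty_value
instance (a : List Int) (empty_value : Int) (out : Int) : Decidable (Spec_length_within_points a empty_value out) := by unfold Spec_length_within_points; infer_instance

-- ===== CLAIM (what is proved, stated in full; the proofs are below) =====
def Claim_equal_length_within_points : Prop := ∀ (a : List Int) (empty_value : Int), Dom_length_within_points a empty_value → Spec_length_within_points a empty_value (length_within_points a empty_value)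

-- ===== LEMMAS AND PROOFS =====

-- proof-only helpers: the two independent pivot updates of A's loop, and B's index list
def pvStepL (e : Int) (l : Int) (p : Int × Int) : Int :=
  if p.2 ≠ e ∧ l = -1 then p.1 else l

def pvStepR (e n : Int) (r : Int) (p : Int × Int) : Int :=
  if p.2 ≠ e ∧ r = -2 then n - p.1 else r

def pvJ (e : Int) (xs : List Int) (s : Int) : List Int :=
  ((PySem.List.enumerate xs s).filter (fun p => p.2 ≠ e)).map Prod.fst

theorem pv_fi_cons (e x : Int) (xs : List Int) :
    (x :: xs).findIdx? (fun v => v ≠ e)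
      = if x = e then (xs.findIdx? (fun v => v ≠ e)).map (· + 1) else some 0 := by
  by_cases h : x = e <;> simp [List.findIdx?_cons, h]

-- A's paired fold splits into two independent folds over the projections
theorem pv_foldl_split (e n : Int) (L : List (Int × (Int × Int))) (x y : Int) :
    L.foldl (fun (st : Int × Int) p =>
      let l := if p.2.1 ≠ e ∧ st.1 = -1 then p.1 else st.1
      let r := if p.2.2 ≠ e ∧ st.2 = -2 then n - p.1 else st.2
      (l, r)) (x, y)
    = ((L.map (fun p => (p.1, p.2.1))).foldl (pvStepL e) x,
       (L.map (fun p => (p.1, p.2.2))).foldl (pvStepR e n) y) := by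
  induction L generalizing x y with
  | nil => rfl
  | cons h t ih => simp only [List.foldl_cons, List.map_cons, pvStepL, pvStepR]; exact ih _ _

theorem pv_enum_zip_fst (xs ys : List Int) (s : Int) (h : xs.length = ys.length) :
    (PySem.List.enumerate (xs.zip ys) s).map (fun p => (p.1, p.2.1))
      = PySem.List.enumerate xs s := by
  induction xs generalizing ys s with
  | nil => simp [PySem.List.enumerate_nil]
  | cons x xs ih =>
    cases ys with
    | nil => simp at h
    | cons y ys =>
      simp only [List.zip_cons_cons, PySem.List.enumerate_cons, List.map_cons]
      exact congrArg _ (ih ys (s + 1) (by simpa using h))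

theorem pv_enum_zip_snd (xs ys : List Int) (s : Int) (h : xs.length = ys.length) :
    (PySem.List.enumerate (xs.zip ys) s).map (fun p => (p.1, p.2.2))
      = PySem.List.enumerate ys s := by
  induction xs generalizing ys s with
  | nil => cases ys with
    | nil => simp [PySem.List.enumerate_nil]
    | cons y ys => simp at h
  | cons x xs ih =>
    cases ys with
    | nil => simp at h
    | cons y ys =>
      simp only [List.zip_cons_cons, PySem.List.enumerate_cons, List.map_cons]
      exact congrArg _ (ih ys (s + 1) (by simpa using h))

theorem pv_stepL_fixed (e : Int) (L : List (Int × Int)) (l : Int) (h : l ≠ -1) :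
    L.foldl (pvStepL e) l = l := by
  induction L with
  | nil => rfl
  | cons p t ih => simp only [List.foldl_cons, pvStepL, h, and_false, if_false]; exact ih

theorem pv_stepL_main (e : Int) (xs : List Int) (s : Int) (hs : 0 ≤ s) :
    (PySem.List.enumerate xs s).foldl (pvStepL e) (-1)
      = (match xs.findIdx? (fun v => v ≠ e) with
         | none => -1
         | some k => s + (k : Int)) := by
  induction xs generalizing s with
  | nil => simp [PySem.List.enumerate_nil]
  | cons x xs ih =>
    rw [PySem.List.enumerate_cons, List.foldl_cons, pv_fi_cons]
    by_cases hx : x = e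
    · have h1 : pvStepL e (-1) (s, x) = -1 := by simp [pvStepL, hx]
      rw [h1, ih (s + 1) (by omega)]
      simp only [hx, if_true]
      cases h : xs.findIdx? (fun v => v ≠ e) with
      | none => simp
      | some k => simp only [Option.map_some]; push_cast; ring
    · have h1 : pvStepL e (-1) (s, x) = s := by simp [pvStepL, hx]
      rw [h1, pv_stepL_fixed e _ s (by omega)]
      simp [hx]

theorem pv_stepR_fixed (e n : Int) (L : List (Int × Int)) (r : Int) (h : r ≠ -2) :
    L.foldl (pvStepR e n) r = r := by
  induction L with
  | nil => rfl
  | cons p t ih => simp only [List.foldl_cons, pvStepR, h, and_false, if_false]; exact ih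

theorem pv_stepR_main (e n : Int) (xs : List Int) (s : Int) (hs : 0 ≤ s)
    (hn : s + (xs.length : Int) ≤ n) :
    (PySem.List.enumerate xs s).foldl (pvStepR e n) (-2)
      = (match xs.findIdx? (fun v => v ≠ e) with
         | none => -2
         | some k => n - (s + (k : Int))) := by
  induction xs generalizing s with
  | nil => simp [PySem.List.enumerate_nil]
  | cons x xs ih =>
    have hlen : s + (xs.length : Int) + 1 ≤ n := by
      simp only [List.length_cons] at hn; push_cast at hn; omega
    rw [PySem.List.enumerate_cons, List.foldl_cons, pv_fi_cons]
    by_cases hx : x = e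
    · have h1 : pvStepR e n (-2) (s, x) = -2 := by simp [pvStepR, hx]
      rw [h1, ih (s + 1) (by omega) (by omega)]
      simp only [hx, if_true]
      cases h : xs.findIdx? (fun v => v ≠ e) with
      | none => simp
      | some k => simp only [Option.map_some]; push_cast; ring
    · have h1 : pvStepR e n (-2) (s, x) = n - s := by simp [pvStepR, hx]
      rw [h1, pv_stepR_fixed e n _ (n - s) (by omega)]
      simp [hx]

theorem pvJ_nil (e s : Int) : pvJ e [] s = [] := by
  simp [pvJ, PySem.List.enumerate_nil]

theorem pvJ_cons (e x : Int) (xs : List Int) (s : Int) :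
    pvJ e (x :: xs) s = (if x = e then [] else [s]) ++ pvJ e xs (s + 1) := by
  by_cases hx : x = e <;> simp [pvJ, PySem.List.enumerate_cons, hx]

theorem pvJ_append (e : Int) (xs ys : List Int) (s : Int) :
    pvJ e (xs ++ ys) s = pvJ e xs s ++ pvJ e ys (s + (xs.length : Int)) := by
  simp [pvJ, PySem.List.enumerate_append, List.filter_append]

theorem pvJ_head (e : Int) (xs : List Int) (s : Int) :
    (pvJ e xs s).head? = (xs.findIdx? (fun v => v ≠ e)).map (fun k => s + (k : Int)) := by
  induction xs generalizing s with
  | nil => simp [pvJ_nil]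
  | cons x xs ih =>
    rw [pvJ_cons, pv_fi_cons]
    by_cases hx : x = e
    · simp only [hx, if_true, List.nil_append]
      rw [ih (s + 1)]
      cases h : xs.findIdx? (fun v => v ≠ e) with
      | none => simp
      | some k => simp; ring
    · simp [hx]

theorem pvJ_shift (e : Int) (xs : List Int) (s : Int) :
    pvJ e xs s = (pvJ e xs 0).map (fun i => s + i) := by
  induction xs generalizing s with
  | nil => simp [pvJ_nil]
  | cons x xs ih =>
    rw [pvJ_cons, pvJ_cons]
    simp only [zero_add]
    rw [ih (s + 1), ih 1, List.map_append, List.map_map]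
    have h2 : ((fun i => s + i) ∘ (fun i => 1 + i)) = (fun i : Int => s + 1 + i) := by
      funext i; simp [Function.comp]; ring
    rw [h2]
    by_cases hx : x = e <;> simp [hx]

theorem pvJ_reverse (e : Int) (xs : List Int) :
    pvJ e xs.reverse 0 = ((pvJ e xs 0).map (fun i => (xs.length : Int) - 1 - i)).reverse := by
  induction xs with
  | nil => simp [pvJ_nil]
  | cons x xs ih =>
    rw [List.reverse_cons, pvJ_append, ih, pvJ_cons e x [] _, pvJ_nil, pvJ_cons e x xs 0]
    simp only [zero_add, List.length_reverse, List.append_nil, List.length_cons]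
    rw [pvJ_shift e xs 1]
    simp only [List.map_append, List.map_map, List.reverse_append]
    have h2 : ((fun i => ((xs.length : Int) + 1) - 1 - i) ∘ (fun i => 1 + i))
        = (fun i : Int => (xs.length : Int) - 1 - i) := by
      funext i; simp [Function.comp]; ring
    have h3 : (fun i => ((xs.length + 1 : Nat) : Int) - 1 - i)
        = (fun i : Int => ((xs.length : Int) + 1) - 1 - i) := by
      funext i; push_cast; ring
    rw [h3, h2]
    by_cases hx : x = e
    · simp [hx]
    · simp only [hx, if_false, List.map_cons, List.map_nil, List.reverse_cons,
        List.reverse_nil, List.nil_append]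
      norm_num

theorem pv_getLast_cons (x : Int) (rest : List Int) (h : x :: rest ≠ []) :
    (x :: rest).getLast h = rest.getLastD x := by
  induction rest generalizing x with
  | nil => rfl
  | cons y t ih => rw [List.getLast_cons_cons, ih, List.getLastD_cons]

theorem pv_A_closed (a : List Int) (e : Int) :
    length_within_points a e
      = (match a.reverse.findIdx? (fun v => v ≠ e) with
         | none => (-2 : Int)
         | some k => (a.length : Int) - (0 + (k : Int)))
      - (match a.findIdx? (fun v => v ≠ e) with
         | none => (-1 : Int)
         | some k => 0 + (k : Int)) + 1 := by
  simp only [length_within_points]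
  rw [pv_foldl_split, pv_enum_zip_fst a a.reverse 0 (by simp),
    pv_enum_zip_snd a a.reverse 0 (by simp),
    pv_stepL_main e a 0 le_rfl,
    pv_stepR_main e (a.length : Int) a.reverse 0 le_rfl (by simp)]

theorem pv_B_closed (a : List Int) (e : Int) :
    length_within_points_alt a e
      = (match pvJ e a 0 with
         | [] => (0 : Int)
         | x :: rest => (x :: rest).getLast (by simp) - x + 2) := rfl

-- ===== VERDICT (by name: the statement is the Claim_ definition above) =====
theorem length_within_points_spec : Claim_equal_length_within_points := by
  intro a e _
  unfold Spec_length_within_points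
  rw [pv_A_closed, pv_B_closed]
  have hhead := pvJ_head e a 0
  have hrevhead := pvJ_head e a.reverse 0
  rw [pvJ_reverse] at hrevhead
  cases hJ : pvJ e a 0 with
  | nil =>
    rw [hJ] at hhead hrevhead
    simp only [List.map_nil, List.reverse_nil, List.head?_nil] at hhead hrevhead
    cases h1 : a.findIdx? (fun v => v ≠ e) with
    | some k => rw [h1] at hhead; simp at hhead
    | none =>
      cases h2 : a.reverse.findIdx? (fun v => v ≠ e) with
      | some k => rw [h2] at hrevhead; simp at hrevhead
      | none => norm_num
  | cons x rest =>
    rw [hJ] at hhead hrevhead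
    -- first nonempty index
    cases h1 : a.findIdx? (fun v => v ≠ e) with
    | none => rw [h1] at hhead; simp at hhead
    | some k =>
      rw [h1] at hhead
      simp at hhead
      -- last nonempty index via the reversed list
      have hlast : ((x :: rest).map (fun i => (a.length : Int) - 1 - i)).reverse.head?
          = some ((a.length : Int) - 1 - rest.getLastD x) := by
        rw [List.head?_reverse, List.getLast?_map,
          List.getLast?_eq_some_getLast (l := x :: rest) (by simp), Option.map_some,
          pv_getLast_cons]
      rw [hlast] at hrevhead
      cases h2 : a.reverse.findIdx? (fun v => v ≠ e) with
      | none => rw [h2] at hrevhead; simp at hrevhead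
      | some j =>
        rw [h2] at hrevhead
        simp only [pv_getLast_cons] at *
        simp at hrevhead ⊢
        subst hhead
        linarith [hrevhead]
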